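-- pv_equiv track=rewrite | github.com/axpirina/Thingsboard-era | AplikazioaBIO.py | split_by_ts
-- ===== SOURCE A (Python) =====
-- def split_by_ts(data):
--     """ Telemetria JSON zatiak banatu 'ts' atributuaren arabera """
--     chunks = []
--     current_chunk = []
--
--     for record in data:
--         # 'ts' atributua duen erregistro berria aurkitu
--         if "ts" in record:
--             # Chunk berria sortu aurrekoa existitzen bada
--             if current_chunk:
--                 chunks.append(current_chunk)
--                 current_chunk = []
--         # Gehitu uneko erregistroa chunk-era
--         current_chunk.append(record)
--
--     # Gehitu azken chunk-a
--     if current_chunk: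
--         chunks.append(current_chunk)
--
--     return chunks
-- ===== SOURCE B (Python) =====
-- def split_by_ts(data):
--     """ Telemetria JSON zatiak banatu 'ts' atributuaren arabera """
--
--     def span_no_ts(xs):
--         # longest prefix of xs without a 'ts' record, and the remainder
--         for k, rec in enumerate(xs):
--             if "ts" in rec:
--                 return xs[:k], xs[k:]
--         return xs, []
--
--     chunks = []
--     rest = data
--     while rest:
--         head, tail = rest[0], rest[1:]
--         pre, rest = span_no_ts(tail)
--         chunks.append([head] + pre)
--     return chunks
-- ===== Notes on version B (the rewrite author's own statement) =====
-- stated objective: alternative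
-- what changed: B builds each chunk whole — take the head record, span off the following non-'ts' records as one slice, repeat on the remainder — instead of A's record-at-a-time loop with a running current_chunk and flush-on-'ts' logic.
import Mathlib
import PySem

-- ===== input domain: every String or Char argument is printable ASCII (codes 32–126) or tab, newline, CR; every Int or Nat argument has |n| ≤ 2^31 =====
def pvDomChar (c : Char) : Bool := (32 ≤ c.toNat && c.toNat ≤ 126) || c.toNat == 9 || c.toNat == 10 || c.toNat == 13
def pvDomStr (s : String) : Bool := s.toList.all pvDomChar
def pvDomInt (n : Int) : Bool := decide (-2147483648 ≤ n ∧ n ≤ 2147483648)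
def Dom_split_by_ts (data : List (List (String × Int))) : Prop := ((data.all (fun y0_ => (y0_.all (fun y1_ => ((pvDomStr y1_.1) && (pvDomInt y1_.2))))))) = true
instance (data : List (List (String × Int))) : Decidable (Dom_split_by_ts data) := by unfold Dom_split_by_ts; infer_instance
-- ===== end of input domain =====

-- B replaces A's record-at-a-time accumulator-and-flush loop by a chunk-at-a-time
-- decomposition (head + span of non-'ts' records per chunk); objective: alternative.

-- ===== PORT A =====
-- '"ts" in record' on a dict = key membership (used by both ports)
def pvHasTs (record : List (String × Int)) : Bool := record.any (fun kv => kv.1 == "ts")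

-- A's loop state: (chunks, current_chunk)
def pvStepA (st : List (List (List (String × Int))) × List (List (String × Int)))
    (record : List (String × Int)) :
    List (List (List (String × Int))) × List (List (String × Int)) :=
  if pvHasTs record then
    if st.2.isEmpty then (st.1, st.2 ++ [record])
    else (st.1 ++ [st.2], [record])
  else (st.1, st.2 ++ [record])

-- 'if current_chunk: chunks.append(current_chunk)' after the loop
def pvFinishA (st : List (List (List (String × Int))) × List (List (String × Int))) :
    List (List (List (String × Int))) :=
  if st.2.isEmpty then st.1 else st.1 ++ [st.2]

def split_by_ts (data : List (List (String × Int))) : List (List (List (String × Int))) :=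
  pvFinishA (data.foldl pvStepA ([], []))

-- ===== PORT B =====
-- span_no_ts: longest prefix without a 'ts' record, and the remainder
def pvSpanNoTs (xs : List (List (String × Int))) :
    List (List (String × Int)) × List (List (String × Int)) :=
  match xs with
  | [] => ([], [])
  | x :: rest =>
    if pvHasTs x then ([], x :: rest)
    else
      let p := pvSpanNoTs rest
      (x :: p.1, p.2)

theorem pvSpanNoTs_snd_length (xs : List (List (String × Int))) :
    (pvSpanNoTs xs).2.length ≤ xs.length := by
  induction xs with
  | nil => simp [pvSpanNoTs]
  | cons x rest ih =>
    simp only [pvSpanNoTs]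
    split
    · simp
    · simpa using Nat.le_succ_of_le ih

-- the 'while rest:' loop, with chunks as accumulator
def pvSplitGo (chunks : List (List (List (String × Int))))
    (rest : List (List (String × Int))) : List (List (List (String × Int))) :=
  match rest with
  | [] => chunks
  | head :: tail =>
    let p := pvSpanNoTs tail
    pvSplitGo (chunks ++ [head :: p.1]) p.2
termination_by rest.length
decreasing_by
  exact Nat.lt_succ_of_le (pvSpanNoTs_snd_length tail)

def split_by_ts_alt (data : List (List (String × Int))) : List (List (List (String × Int))) :=
  pvSplitGo [] data

-- ===== PRECONDITION & SPEC =====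
def Spec_split_by_ts (data : List (List (String × Int))) (out : List (List (List (String × Int)))) : Prop := out = split_by_ts_alt data
instance (data : List (List (String × Int))) (out : List (List (List (String × Int)))) : Decidable (Spec_split_by_ts data out) := by unfold Spec_split_by_ts; infer_instance

-- ===== CLAIM (what is proved, stated in full; the proofs are below) =====
def Claim_equal_split_by_ts : Prop := ∀ (data : List (List (String × Int))), Dom_split_by_ts data → Spec_split_by_ts data (split_by_ts data)

-- ===== LEMMAS AND PROOFS =====

-- A's chunks accumulator only ever grows on the right
theorem pvFlush (xs : List (List (String × Int)))
    (chunks : List (List (List (String × Int)))) (cur : List (List (String × Int))) :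
    pvFinishA (xs.foldl pvStepA (chunks, cur)) =
      chunks ++ pvFinishA (xs.foldl pvStepA ([], cur)) := by
  induction xs generalizing chunks cur with
  | nil =>
    simp only [List.foldl, pvFinishA]
    split <;> simp
  | cons x xs ih =>
    simp only [List.foldl, pvStepA]
    by_cases h : pvHasTs x = true
    · by_cases he : cur.isEmpty = true
      · simp only [h, he, if_true]
        exact ih chunks (cur ++ [x])
      · simp only [h, he, if_true, if_false, Bool.false_eq_true]
        rw [ih (chunks ++ [cur]) [x], ih ([] ++ [cur]) [x]]
        simp
    · simp only [h, if_false, Bool.false_eq_true]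
      exact ih chunks (cur ++ [x])

theorem pvSplitGo_acc : ∀ (rest : List (List (String × Int)))
    (chunks : List (List (List (String × Int)))),
    pvSplitGo chunks rest = chunks ++ pvSplitGo [] rest
  | [], chunks => by simp [pvSplitGo]
  | head :: tail, chunks => by
    simp only [pvSplitGo]
    rw [pvSplitGo_acc (pvSpanNoTs tail).2 (chunks ++ [head :: (pvSpanNoTs tail).1]),
        pvSplitGo_acc (pvSpanNoTs tail).2 ([] ++ [head :: (pvSpanNoTs tail).1])]
    simp
termination_by rest => rest.length
decreasing_by all_goals exact Nat.lt_succ_of_le (pvSpanNoTs_snd_length tail)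

theorem pvSplitGo_nil_cons (head : List (String × Int)) (tail : List (List (String × Int))) :
    pvSplitGo [] (head :: tail) =
      (head :: (pvSpanNoTs tail).1) :: pvSplitGo [] (pvSpanNoTs tail).2 := by
  simp only [pvSplitGo]
  rw [pvSplitGo_acc]
  simp

-- main loop invariant: with a nonempty current chunk, A's remaining run produces
-- 'cur' extended by the non-ts span, then B's chunks of the remainder
theorem pvMain (xs : List (List (String × Int))) (cur : List (List (String × Int)))
    (hc : cur ≠ []) :
    pvFinishA (xs.foldl pvStepA ([], cur)) =
      (cur ++ (pvSpanNoTs xs).1) :: pvSplitGo [] (pvSpanNoTs xs).2 := by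
  induction xs generalizing cur with
  | nil => simp [pvFinishA, pvSpanNoTs, pvSplitGo, hc]
  | cons x xs ih =>
    simp only [List.foldl, pvStepA, pvSpanNoTs]
    by_cases h : pvHasTs x = true
    · have he : cur.isEmpty = false := by simpa using hc
      simp only [h, he, if_true, if_false, Bool.false_eq_true]
      rw [pvFlush, ih [x] (by simp), pvSplitGo_nil_cons]
      simp
    · simp only [h, if_false, Bool.false_eq_true]
      rw [ih (cur ++ [x]) (by simp)]
      simp

theorem split_by_ts_spec : Claim_equal_split_by_ts := by
  intro data _
  unfold Spec_split_by_ts split_by_ts split_by_ts_alt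
  cases data with
  | nil => simp [pvFinishA, pvSplitGo]
  | cons d ds =>
    have h1 : pvStepA ([], []) d = ([], [d]) := by
      simp [pvStepA]
    simp only [List.foldl, h1]
    rw [pvMain ds [d] (by simp), pvSplitGo_nil_cons]
    simp
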